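-- pv_equiv track=rewrite | github.com/SafnetCo2/codewars | GEE.PY | solve
-- ===== SOURCE A (Python) =====
-- def solve(s):
--     freq_map = {}
--
--     # Populate the frequency of each character
--     for char in s:
--         freq_map[char] = freq_map.get(char, 0) + 1
--
--
--     max_freq_value = float('-inf')
--     min_freq_value = float('inf')
--     max_freq_counter = 0
--     for key in freq_map:
--         if freq_map[key] == max_freq_value:
--             max_freq_counter += 1
--
--         if freq_map[key] > max_freq_value:
--             max_freq_value = freq_map[key]
--             max_freq_counter = 1
--
--         if freq_map[key] < min_freq_value:
--             min_freq_value = freq_map[key]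
--
--     # Check if the given constraints of the problem are satisfied
--     if (max_freq_value - min_freq_value) == 0:
--         return True
--     elif (max_freq_value - min_freq_value) == 1:
--         if max_freq_counter == 1:
--             return True
--         else:
--             return False
--     else:
--         return False
-- ===== SOURCE B (Python) =====
-- def solve(s):
--     freq = {}
--     for c in s:
--         freq[c] = freq.get(c, 0) + 1
--     # frequency-of-frequencies: how many characters have each count
--     meta = {}
--     for v in freq.values():
--         meta[v] = meta.get(v, 0) + 1
--     items = sorted(meta.items(), key=lambda kv: kv[0])
--     if len(items) == 1:
--         return True
--     if len(items) == 2: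
--         (lo, _), (hi, hc) = items
--         return hi - lo == 1 and hc == 1
--     return False
-- ===== Notes on version B (the rewrite author's own statement) =====
-- stated objective: alternative
-- what changed: Replaces A's single tracking loop computing running max/min/max-count with +/-inf sentinels by a frequency-of-frequencies classification: build a second counter over the counts, sort its (count, multiplicity) items, and decide by whether there are one or two distinct counts (the higher one unique and adjacent).
import Mathlib
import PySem

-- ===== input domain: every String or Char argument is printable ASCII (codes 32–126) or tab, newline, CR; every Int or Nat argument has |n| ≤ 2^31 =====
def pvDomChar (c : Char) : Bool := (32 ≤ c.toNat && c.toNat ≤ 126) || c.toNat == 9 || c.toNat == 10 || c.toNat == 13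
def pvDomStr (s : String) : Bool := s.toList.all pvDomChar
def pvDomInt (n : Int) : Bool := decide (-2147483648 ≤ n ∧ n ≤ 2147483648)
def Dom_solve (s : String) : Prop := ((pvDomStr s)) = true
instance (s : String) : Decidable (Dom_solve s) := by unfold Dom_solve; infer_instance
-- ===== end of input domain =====

-- B replaces A's tracking loop (running max/min/max-count with ±inf sentinels) by a
-- frequency-of-frequencies classification: count the counts, sort the (count, multiplicity)
-- items, and decide by how many distinct counts there are (objective: alternative).

-- ===== PORT A =====
-- A's float('-inf') / float('inf') sentinels are modelled exactly by Option Int (none = unset):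
-- every frequency is a positive int, 'v == -inf' is False, 'v > -inf' and 'v < inf' are True — matched by the none branches.
-- Loop state is (max_freq_value, max_freq_counter, min_freq_value).
def solveStepA (fm : PySem.Dict Char Int) (st : Option Int × Int × Option Int) (k : Char) :
    Option Int × Int × Option Int :=
  let mx := st.1
  let cnt := st.2.1
  let mn := st.2.2
  let v := fm.getD k 0          -- freq_map[key]; k ∈ keys so the lookup never raises
  let cnt := if (match mx with | some m => v == m | none => false) then cnt + 1 else cnt
  let p := if (match mx with | none => true | some m => decide (m < v)) then (some v, (1 : Int)) else (mx, cnt)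
  let mn := if (match mn with | none => true | some m => decide (v < m)) then some v else mn
  (p.1, p.2, mn)

def solve (s : String) : Bool :=
  let fm := s.toList.foldl (fun d c => d.insert c (d.getD c 0 + 1)) (PySem.Dict.empty : PySem.Dict Char Int)
  let st := fm.keys.foldl (solveStepA fm) ((none : Option Int), (0 : Int), (none : Option Int))
  match st with
  | (some mx, cnt, some mn) =>
      if mx - mn = 0 then true
      else if mx - mn = 1 then (if cnt = 1 then true else false)
      else false
  | _ => false                  -- empty dict: (-inf) - inf = -inf hits the final else in Python

-- ===== PORT B =====
def solve_alt (s : String) : Bool :=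
  let freq := s.toList.foldl (fun d c => d.insert c (d.getD c 0 + 1)) (PySem.Dict.empty : PySem.Dict Char Int)
  let meta2 := freq.values.foldl (fun d v => d.insert v (d.getD v 0 + 1)) (PySem.Dict.empty : PySem.Dict Int Int)
  let items := PySem.List.sorted meta2.items (fun kv => kv.1) false
  match items with
  | [_] => true
  | [(lo, _), (hi, hc)] => (hi - lo == 1) && (hc == 1)
  | _ => false

-- ===== PRECONDITION & SPEC =====
def Spec_solve (s : String) (out : Bool) : Prop := out = solve_alt s
instance (s : String) (out : Bool) : Decidable (Spec_solve s out) := by unfold Spec_solve; infer_instance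

-- ===== CLAIM (what is proved, stated in full; the proofs are below) =====
def Claim_equal_solve : Prop := ∀ (s : String), Dom_solve s → Spec_solve s (solve s)

-- ===== LEMMAS AND PROOFS =====

-- value-level form of A's loop body
def stepV (st : Option Int × Int × Option Int) (v : Int) : Option Int × Int × Option Int :=
  let mx := st.1
  let cnt := st.2.1
  let mn := st.2.2
  let cnt := if (match mx with | some m => v == m | none => false) then cnt + 1 else cnt
  let p := if (match mx with | none => true | some m => decide (m < v)) then (some v, (1 : Int)) else (mx, cnt)
  let mn := if (match mn with | none => true | some m => decide (v < m)) then some v else mn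
  (p.1, p.2, mn)

-- B's verdict as a function of the sorted items list (used only to state/drive the proof)
def classify (L : List (Int × Int)) : Bool :=
  match L with
  | [_] => true
  | [(lo, _), (hi, hc)] => (hi - lo == 1) && (hc == 1)
  | _ => false

theorem stepA_eq_stepV (fm : PySem.Dict Char Int) :
    solveStepA fm = fun st k => stepV st (fm.getD k 0) := by
  funext st k; rfl

theorem stepV_some (m c n v : Int) :
    stepV (some m, c, some n) v =
      (if m < v then (some v, (1 : Int), some (min n v))
       else if v = m then (some m, c + 1, some (min n v))
       else (some m, c, some (min n v))) := by
  simp only [stepV]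
  rcases lt_trichotomy m v with h | h | h <;>
    simp [h, min_def] <;> split_ifs <;> simp_all <;> omega

-- A's loop from a set state computes (running max, count of occurrences of that max, running min)
theorem foldV_some (l : List Int) (m c n : Int) :
    l.foldl stepV (some m, c, some n) =
      (some (l.foldl max m),
       (if l.foldl max m = m then c else 0) + (l.count (l.foldl max m) : Int),
       some (l.foldl min n)) := by
  induction l generalizing m c n with
  | nil => simp
  | cons v t ih =>
    have hmax := (PySem.List.le_foldl_max t (max m v)).1
    simp only [List.foldl_cons, stepV_some]
    rcases lt_trichotomy m v with h | h | h
    · have hmv : max m v = v := by omega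
      rw [if_pos h, ih]
      simp only [hmv]
      rw [hmv] at hmax
      have hne : ¬ t.foldl max v = m := by omega
      simp only [Prod.mk.injEq, List.count_cons, beq_iff_eq]
      refine ⟨trivial, ?_, trivial⟩
      push_cast
      split_ifs <;> omega
    · have h1 : ¬ m < v := by omega
      have hmv : max m v = m := by omega
      rw [if_neg h1, if_pos h.symm, ih]
      simp only [hmv]
      simp only [Prod.mk.injEq, List.count_cons, beq_iff_eq]
      refine ⟨trivial, ?_, trivial⟩
      push_cast
      split_ifs <;> omega
    · have h1 : ¬ m < v := by omega
      have h2 : ¬ v = m := by omega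
      have hmv : max m v = m := by omega
      rw [if_neg h1, if_neg h2, ih]
      simp only [hmv]
      rw [hmv] at hmax
      have hne : ¬ v = t.foldl max m := by omega
      simp only [Prod.mk.injEq, List.count_cons, beq_iff_eq]
      refine ⟨trivial, ?_, trivial⟩
      push_cast
      split_ifs <;> omega

-- A's verdict, expressed over the list of per-distinct-character counts (head-decomposed)
theorem solve_char (s : String) (x : Char) (xs : List Char) (hcs : s.toList = x :: xs)
    (k : Char) (ks : List Char) (hks : PySem.Set.ofList (x :: xs) = k :: ks)
    (v : Int) (t : List Int)
    (hv : v = (PySem.List.count (x :: xs) k : Int))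
    (ht : t = ks.map (fun c => (PySem.List.count (x :: xs) c : Int))) :
    solve s =
      (if t.foldl max v - t.foldl min v = 0 then true
       else if t.foldl max v - t.foldl min v = 1 then
         (if ((v :: t).count (t.foldl max v) : Int) = 1 then true else false)
       else false) := by
  simp only [solve]
  rw [PySem.Dict.foldl_insert_getD_add_one_eq_counter, PySem.Dict.keys_counter,
      stepA_eq_stepV, hcs, hks]
  have hfold :
      (k :: ks).foldl (fun st c => stepV st ((PySem.Dict.counter (x :: xs)).getD c 0)) ((none : Option Int), (0 : Int), (none : Option Int))
        = ((k :: ks).map (fun c => (PySem.List.count (x :: xs) c : Int))).foldl stepV ((none : Option Int), (0 : Int), (none : Option Int)) := by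
    rw [List.foldl_map]
    congr 1
    funext st c
    rw [PySem.Dict.getD_counter]
    rfl
  rw [hfold]
  simp only [List.map_cons, List.foldl_cons, ← hv, ← ht]
  have hfirst : stepV ((none : Option Int), (0 : Int), (none : Option Int)) v =
      (some v, (1 : Int), some v) := by
    simp [stepV]
  rw [hfirst, foldV_some]
  have hcnt : (if t.foldl max v = v then (1 : Int) else 0) + (t.count (t.foldl max v) : Int)
      = ((v :: t).count (t.foldl max v) : Int) := by
    simp only [List.count_cons, beq_iff_eq]
    push_cast
    by_cases h : t.foldl max v = v
    · simp only [h, if_pos]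
      omega
    · have h' : ¬ v = t.foldl max v := fun e => h e.symm
      simp [h, h']
  rw [hcnt]

-- ===== MAIN EQUIVALENCE =====
theorem solve_eq_solve_alt (s : String) : solve s = solve_alt s := by
  rcases hcs : s.toList with _ | ⟨x, xs⟩
  · -- empty string: both sides compute on the empty character list
    simp only [solve, solve_alt, hcs]
    rfl
  · have hvals : ((s.toList).foldl (fun d c => d.insert c (d.getD c 0 + 1)) (PySem.Dict.empty : PySem.Dict Char Int)).values
        = (PySem.Set.ofList (x :: xs)).map (fun c => (PySem.List.count (x :: xs) c : Int)) := by
      rw [hcs, PySem.Dict.foldl_insert_getD_add_one_eq_counter]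
      simp only [PySem.Dict.values, PySem.Dict.items_counter, List.map_map]
      rfl
    have hx : x ∈ PySem.Set.ofList (x :: xs) := by
      rw [PySem.Set.mem_ofList]; exact List.mem_cons_self
    rcases hks : PySem.Set.ofList (x :: xs) with _ | ⟨k, ks⟩
    · rw [hks] at hx; simp at hx
    · have hA := solve_char s x xs hcs k ks hks _ _ rfl rfl
      rw [hA]
      have hB : solve_alt s = classify (PySem.List.sorted
          ((PySem.Dict.counter ((PySem.List.count (x :: xs) k : Int) ::
            ks.map (fun c => (PySem.List.count (x :: xs) c : Int)))).items) (fun kv => kv.1) false) := by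
        simp only [solve_alt, classify]
        rw [hvals, hks]
        simp only [List.map_cons]
        rw [PySem.Dict.foldl_insert_getD_add_one_eq_counter]
      rw [hB]
      set v : Int := (PySem.List.count (x :: xs) k : Int) with hv
      set t : List Int := ks.map (fun c => (PySem.List.count (x :: xs) c : Int)) with ht
      set vals : List Int := v :: t with hvt
      set M : Int := t.foldl max v with hM
      set N : Int := t.foldl min v with hN
      set items : List (Int × Int) := (PySem.Dict.counter vals).items with hitems
      set L : List (Int × Int) := PySem.List.sorted items (fun kv => kv.1) false with hL
      have hitemsD : items = (PySem.Set.ofList vals).map (fun a => (a, (PySem.List.count vals a : Int))) := by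
        rw [hitems, PySem.Dict.items_counter]
        rfl
      have hperm : L.Perm items := PySem.List.sorted_perm items (fun kv => kv.1) false
      have hmemL : ∀ p ∈ L, p.1 ∈ vals ∧ p.2 = ((PySem.List.count vals p.1 : Int)) := by
        intro p hp
        have hpi : p ∈ items := hperm.mem_iff.mp hp
        rw [hitemsD] at hpi
        rcases List.mem_map.mp hpi with ⟨a, ha, hpa⟩
        have ha' : a ∈ vals := Iff.mp (PySem.Set.mem_ofList _ _) ha
        cases hpa
        exact ⟨ha', rfl⟩
      have hkeyL : ∀ y ∈ vals, y ∈ L.map (fun kv => kv.1) := by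
        intro y hy
        have : y ∈ items.map (fun kv => kv.1) := by
          rw [hitemsD, List.map_map]
          exact List.mem_map.mpr ⟨y, Iff.mpr (PySem.Set.mem_ofList _ _) hy, rfl⟩
        exact ((hperm.map (fun kv => kv.1)).mem_iff).mpr this
      have hnodupKeys : (L.map (fun kv => kv.1)).Nodup := by
        refine ((hperm.map (fun kv => kv.1)).nodup_iff).mpr ?_
        rw [hitemsD, List.map_map]
        simp only [Function.comp_def, List.map_id']
        exact PySem.Set.nodup_ofList vals
      have hpwle : (L.map (fun kv => kv.1)).Pairwise (· ≤ ·) :=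
        PySem.List.sorted_map_key_pairwise items (fun kv => kv.1)
      have hpwlt : L.Pairwise (fun a b => a.1 < b.1) := by
        rw [← List.pairwise_map (f := fun kv : Int × Int => kv.1)]
        have hne := List.Nodup.pairwise_of_forall_ne hnodupKeys (fun a _ b _ h => h)
        exact (List.Pairwise.and hpwle hne).imp (fun h => lt_of_le_of_ne h.1 h.2)
      have hMmem : M ∈ vals := by
        rcases PySem.List.foldl_max_mem t v with h | h
        · rw [hvt, hM, h]; exact List.mem_cons_self
        · exact List.mem_cons_of_mem _ h
      have hMub : ∀ y ∈ vals, y ≤ M := by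
        intro y hy
        rcases List.mem_cons.mp hy with rfl | hy'
        · exact (PySem.List.le_foldl_max t v).1
        · exact (PySem.List.le_foldl_max t v).2 y hy'
      have hNmem : N ∈ vals := by
        rcases PySem.List.foldl_min_mem t v with h | h
        · rw [hvt, hN, h]; exact List.mem_cons_self
        · exact List.mem_cons_of_mem _ h
      have hNlb : ∀ y ∈ vals, N ≤ y := by
        intro y hy
        rcases List.mem_cons.mp hy with rfl | hy'
        · exact (PySem.List.foldl_min_le t v).1
        · exact (PySem.List.foldl_min_le t v).2 y hy'
      rcases hLc : L with _ | ⟨p, _ | ⟨q, _ | ⟨r, rest⟩⟩⟩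
      · exfalso
        have hvm := hkeyL v List.mem_cons_self
        rw [hLc] at hvm
        simp at hvm
      · -- one distinct count: every value equals p.1, so M = N
        have hall : ∀ y ∈ vals, y = p.1 := by
          intro y hy
          have := hkeyL y hy
          rw [hLc] at this
          simpa using this
        have hMv : M = p.1 := hall M hMmem
        have hNv : N = p.1 := hall N hNmem
        simp [classify, hMv, hNv]
      · -- two distinct counts p.1 < q.1: N = p.1, M = q.1, q.2 = multiplicity of the max
        have hpq : p.1 < q.1 := by
          rw [hLc] at hpwlt
          exact (List.pairwise_cons.mp hpwlt).1 q List.mem_cons_self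
        have hpv := hmemL p (by rw [hLc]; exact List.mem_cons_self)
        have hqv := hmemL q (by rw [hLc]; exact List.mem_cons_of_mem _ List.mem_cons_self)
        have hMq : M = q.1 := by
          have h1 : q.1 ≤ M := hMub q.1 hqv.1
          have h2 : M ∈ L.map (fun kv => kv.1) := hkeyL M hMmem
          rw [hLc] at h2
          simp only [List.map_cons, List.map_nil, List.mem_cons, List.not_mem_nil, or_false] at h2
          rcases h2 with h2 | h2 <;> omega
        have hNp : N = p.1 := by
          have h1 : N ≤ p.1 := hNlb p.1 hpv.1
          have h2 : N ∈ L.map (fun kv => kv.1) := hkeyL N hNmem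
          rw [hLc] at h2
          simp only [List.map_cons, List.map_nil, List.mem_cons, List.not_mem_nil, or_false] at h2
          rcases h2 with h2 | h2 <;> omega
        have hcount : q.2 = ((vals.count M : Int)) := by
          rw [hqv.2, hMq]
          rfl
        have hne0 : ¬ (M - N = 0) := by omega
        rw [if_neg hne0]
        simp only [classify]
        by_cases h1 : M - N = 1
        · have hd : (q.1 - p.1 == 1) = true := by simp; omega
          rw [if_pos h1, hd, Bool.true_and]
          by_cases h2 : ((vals.count M : Int)) = 1
          · rw [if_pos (by exact_mod_cast h2)]
            have : (q.2 == 1) = true := by rw [hcount]; simp [h2]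
            rw [this]
          · rw [if_neg (by exact_mod_cast h2)]
            have : (q.2 == 1) = false := by rw [hcount]; simpa using h2
            rw [this]
        · have hd : (q.1 - p.1 == 1) = false := by simp; omega
          rw [if_neg h1, hd, Bool.false_and]
      · -- at least three distinct counts: M - N ≥ 2, both sides false
        have hpv := hmemL p (by rw [hLc]; exact List.mem_cons_self)
        have hrv := hmemL r (by
          rw [hLc]
          exact List.mem_cons_of_mem _ (List.mem_cons_of_mem _ List.mem_cons_self))
        have hpqr : p.1 < q.1 ∧ q.1 < r.1 := by
          rw [hLc] at hpwlt
          exact ⟨(List.pairwise_cons.mp hpwlt).1 q List.mem_cons_self,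
            (List.pairwise_cons.mp (List.pairwise_cons.mp hpwlt).2).1 r List.mem_cons_self⟩
        have h1 : r.1 ≤ M := hMub r.1 hrv.1
        have h2 : N ≤ p.1 := hNlb p.1 hpv.1
        have hne0 : ¬ (M - N = 0) := by omega
        have hne1 : ¬ (M - N = 1) := by omega
        rw [if_neg hne0, if_neg hne1]
        rfl

-- ===== VERDICT (by name: the statement is the Claim_ definition above) =====
theorem solve_spec : Claim_equal_solve := by
  intro s _
  unfold Spec_solve
  exact solve_eq_solve_alt s
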